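-- pv_equiv track=rewrite | github.com/babar-raza/foss-launcher | src/launch/workers/w2_facts_builder/enrich_workflows.py | _estimate_time
-- ===== SOURCE A (Python) =====
-- from typing import Any, Dict, List, Optional
--
-- def _estimate_time(claims: List[Dict[str, Any]]) -> int:
--     """Estimate workflow completion time in minutes.
--
--     Args:
--         claims: List of workflow claims
--
--     Returns:
--         Estimated time in minutes
--     """
--     text = " ".join(c.get('claim_text', '').lower() for c in claims)
--     if 'install' in text or 'setup' in text:
--         base = 5
--     elif 'configure' in text:
--         base = 10
--     else:
--         base = 15
--     return base + max(0, (len(claims) - 1)) * 5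
-- ===== SOURCE B (Python) =====
-- from typing import Any, Dict, List
--
-- def _estimate_time(claims: List[Dict[str, Any]]) -> int:
--     """Estimate workflow completion time in minutes.
--
--     Each claim is classified into a numeric rank (0 = install/setup,
--     1 = configure, 2 = other); the whole estimate is the closed formula
--     5 * (min_rank + max(1, n)).
--     """
--     def rank(c):
--         t = c.get('claim_text', '').lower()
--         if 'install' in t or 'setup' in t:
--             return 0
--         if 'configure' in t:
--             return 1
--         return 2
--     m = 2
--     for c in claims:
--         m = min(m, rank(c))
--     return 5 * (m + max(1, len(claims)))
-- ===== Notes on version B (the rewrite author's own statement) =====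
-- stated objective: alternative
-- what changed: Replaces joining all texts into one string and branching on substring hits to pick a base 5/10/15 plus max(0,n-1)*5, by classifying each claim into a numeric rank (0/1/2), reducing with min, and returning the single closed formula 5*(min_rank + max(1,n)); correct because the keywords contain no space so they cannot span join boundaries, and base = 5*(min_rank+1).
import Mathlib
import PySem

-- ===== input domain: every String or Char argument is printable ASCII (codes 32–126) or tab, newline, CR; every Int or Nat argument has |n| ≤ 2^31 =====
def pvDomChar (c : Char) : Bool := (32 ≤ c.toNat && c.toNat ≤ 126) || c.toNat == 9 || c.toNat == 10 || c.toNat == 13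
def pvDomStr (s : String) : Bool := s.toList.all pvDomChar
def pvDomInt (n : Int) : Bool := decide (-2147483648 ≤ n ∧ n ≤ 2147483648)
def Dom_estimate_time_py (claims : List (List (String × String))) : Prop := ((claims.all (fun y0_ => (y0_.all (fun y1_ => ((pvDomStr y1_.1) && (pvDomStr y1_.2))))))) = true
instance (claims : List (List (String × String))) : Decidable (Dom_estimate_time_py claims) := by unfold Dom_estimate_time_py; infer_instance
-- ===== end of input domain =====

-- B replaces A's "join all texts, substring-search, branch to a base, add max(0,n-1)*5" by a
-- per-claim numeric rank (0/1/2), a min-reduction, and the closed formula 5*(min_rank + max(1,n))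
-- (objective: alternative decomposition, same cost).

-- ===== PORT A =====
def estimate_time_py (claims : List (List (String × String))) : Int :=
  let text := PySem.Str.join " "
    (claims.map (fun c => PySem.Str.lower ((PySem.Dict.mk c).getD "claim_text" "")))
  let base : Int :=
    if PySem.Str.isIn "install" text || PySem.Str.isIn "setup" text then 5
    else if PySem.Str.isIn "configure" text then 10
    else 15
  base + max 0 ((claims.length : Int) - 1) * 5

-- ===== PORT B =====
def pvRank (c : List (String × String)) : Int :=
  let t := PySem.Str.lower ((PySem.Dict.mk c).getD "claim_text" "")
  if PySem.Str.isIn "install" t || PySem.Str.isIn "setup" t then 0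
  else if PySem.Str.isIn "configure" t then 1
  else 2

def estimate_time_py_alt (claims : List (List (String × String))) : Int :=
  let m := claims.foldl (fun m c => min m (pvRank c)) 2
  5 * (m + max 1 (claims.length : Int))

-- ===== PRECONDITION & SPEC =====
def Spec_estimate_time_py (claims : List (List (String × String))) (out : Int) : Prop := out = estimate_time_py_alt claims
instance (claims : List (List (String × String))) (out : Int) : Decidable (Spec_estimate_time_py claims out) := by unfold Spec_estimate_time_py; infer_instance

-- ===== CLAIM (what is proved, stated in full; the proofs are below) =====
def Claim_equal_estimate_time_py : Prop := ∀ (claims : List (List (String × String))), Dom_estimate_time_py claims → Spec_estimate_time_py claims (estimate_time_py claims)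

-- ===== LEMMAS AND PROOFS =====

-- A keyword not containing c cannot be a prefix of xs ++ c :: ys without being a prefix of xs.
theorem pv_prefix_append_cons (k xs ys : List Char) (c : Char) (hc : c ∉ k)
    (h : k <+: xs ++ c :: ys) : k <+: xs := by
  induction k generalizing xs with
  | nil => exact List.nil_prefix
  | cons a k' ih =>
    cases xs with
    | nil =>
      rcases h with ⟨t, ht⟩
      simp at ht
      exact absurd (ht.1 ▸ List.mem_cons_self) hc
    | cons x xs' =>
      rcases h with ⟨t, ht⟩
      simp at ht
      obtain ⟨rfl, ht'⟩ := ht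
      have hpre : k' <+: xs' := ih xs' (fun hm => hc (List.mem_cons_of_mem _ hm)) ⟨t, ht'⟩
      obtain ⟨u, hu⟩ := hpre
      exact ⟨u, by simp [hu]⟩

-- A keyword not containing c is infix of xs ++ c :: ys iff it is infix of xs or of ys.
theorem pv_infix_append_cons (k xs ys : List Char) (c : Char) (hc : c ∉ k) :
    k <:+: xs ++ c :: ys ↔ k <:+: xs ∨ k <:+: ys := by
  constructor
  · intro h
    induction xs with
    | nil =>
      simp only [List.nil_append] at h
      rcases List.infix_cons_iff.mp h with hp | hi
      · exact Or.inl ((pv_prefix_append_cons k [] ys c hc hp).isInfix)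
      · exact Or.inr hi
    | cons x xs' ih =>
      rcases List.infix_cons_iff.mp h with hp | hi
      · exact Or.inl (pv_prefix_append_cons k (x :: xs') ys c hc hp).isInfix
      · rcases ih hi with h1 | h2
        · exact Or.inl (h1.trans ⟨[x], [], by simp⟩)
        · exact Or.inr h2
  · rintro (h | h)
    · exact h.trans ⟨[], c :: ys, rfl⟩
    · exact h.trans ⟨xs ++ [c], [], by simp⟩

-- A space-free nonempty keyword is infix of the ' '-join iff it is infix of some piece.
theorem pv_infix_join (k : List Char) (hk : k ≠ []) (hc : ' ' ∉ k) (ps : List (List Char)) :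
    k <:+: PySem.Chars.join [' '] ps ↔ ∃ p ∈ ps, k <:+: p := by
  induction ps with
  | nil =>
    rw [PySem.Chars.join_nil]
    simp [List.infix_nil, hk]
  | cons p rest ih =>
    cases rest with
    | nil =>
      rw [PySem.Chars.join_singleton]
      simp
    | cons q r =>
      rw [PySem.Chars.join_cons_cons]
      have hrw : p ++ [' '] ++ PySem.Chars.join [' '] (q :: r)
          = p ++ ' ' :: PySem.Chars.join [' '] (q :: r) := by simp
      rw [hrw, pv_infix_append_cons k p _ ' ' hc, ih]
      simp only [List.mem_cons]
      constructor
      · rintro (h | ⟨x, hx, h⟩)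
        · exact ⟨p, Or.inl rfl, h⟩
        · exact ⟨x, Or.inr hx, h⟩
      · rintro ⟨x, (rfl | hx), h⟩
        · exact Or.inl h
        · exact Or.inr ⟨x, hx, h⟩

-- Str-level: 'kw in " ".join(parts)' for a space-free keyword scans the parts individually.
theorem pv_isIn_join (kw : String) (hk : kw.toList ≠ []) (hc : ' ' ∉ kw.toList)
    (parts : List String) :
    PySem.Str.isIn kw (PySem.Str.join " " parts) = parts.any (fun p => PySem.Str.isIn kw p) := by
  rw [PySem.Str.isIn_eq, PySem.Str.toList_join]
  have hsep : (" " : String).toList = [' '] := rfl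
  rw [hsep]
  by_cases h : kw.toList <:+: PySem.Chars.join [' '] (parts.map String.toList)
  · rw [(PySem.Chars.isIn_iff_infix _ _).mpr h]
    obtain ⟨p, hp, hkp⟩ := (pv_infix_join _ hk hc _).mp h
    obtain ⟨s, hs, rfl⟩ := List.mem_map.mp hp
    symm
    rw [List.any_eq_true]
    exact ⟨s, hs, by rw [PySem.Str.isIn_eq]; exact (PySem.Chars.isIn_iff_infix _ _).mpr hkp⟩
  · rw [(PySem.Chars.isIn_eq_false_iff _ _).mpr h]
    symm
    rw [List.any_eq_false]
    intro s hs
    rw [PySem.Str.isIn_eq]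
    intro hkp
    exact h ((pv_infix_join _ hk hc _).mpr
      ⟨s.toList, List.mem_map_of_mem hs, (PySem.Chars.isIn_iff_infix _ _).mp hkp⟩)

-- shorthand predicates for the two keyword classes of a single claim
def pvP0 (c : List (String × String)) : Bool :=
  PySem.Str.isIn "install" (PySem.Str.lower ((PySem.Dict.mk c).getD "claim_text" "")) ||
  PySem.Str.isIn "setup" (PySem.Str.lower ((PySem.Dict.mk c).getD "claim_text" ""))

def pvP1 (c : List (String × String)) : Bool :=
  PySem.Str.isIn "configure" (PySem.Str.lower ((PySem.Dict.mk c).getD "claim_text" ""))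

-- min of two rank if-trees merges the conditions by disjunction.
theorem pv_min_rank (a b c d : Bool) :
    min (if a then (0:Int) else if b then 1 else 2) (if c then (0:Int) else if d then 1 else 2)
    = if (a || c) then 0 else if (b || d) then 1 else 2 := by
  cases a <;> cases b <;> cases c <;> cases d <;> norm_num

-- B's min-fold computes: 0 if some claim has rank 0, else 1 if some has rank 1, else 2.
theorem pv_fold_min (claims : List (List (String × String))) (m : Int) (hm : m ≤ 2) :
    claims.foldl (fun m c => min m (pvRank c)) m
    = min m (if claims.any pvP0 then 0 else if claims.any pvP1 then 1 else 2) := by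
  induction claims generalizing m with
  | nil => simp; omega
  | cons c rest ih =>
    simp only [List.foldl_cons, List.any_cons]
    have hrank : pvRank c = if pvP0 c then 0 else if pvP1 c then 1 else 2 := by
      simp only [pvRank, pvP0, pvP1]
      rfl
    have hle : min m (pvRank c) ≤ 2 := le_trans (min_le_left _ _) hm
    rw [ih _ hle, min_assoc, hrank, pv_min_rank]
    rfl

-- any over a disjunction splits.
theorem pv_any_or {α : Type} (xs : List α) (p q : α → Bool) :
    xs.any (fun x => p x || q x) = (xs.any p || xs.any q) := by
  induction xs with
  | nil => simp
  | cons x t ih =>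
    simp only [List.any_cons, ih]
    cases p x <;> cases q x <;> simp

-- ===== VERDICT (by name: the statement is the Claim_ definition above) =====
theorem estimate_time_py_spec : Claim_equal_estimate_time_py := by
  intro claims _
  show estimate_time_py claims = estimate_time_py_alt claims
  simp only [estimate_time_py, estimate_time_py_alt]
  rw [pv_fold_min _ _ (by omega)]
  rw [pv_isIn_join "install" (by decide) (by decide),
      pv_isIn_join "setup" (by decide) (by decide),
      pv_isIn_join "configure" (by decide) (by decide)]
  simp only [List.any_map, Function.comp_def]
  have hP0 : claims.any pvP0
      = ((claims.any fun c => PySem.Str.isIn "install" (PySem.Str.lower ((PySem.Dict.mk c).getD "claim_text" ""))) ||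
         claims.any fun c => PySem.Str.isIn "setup" (PySem.Str.lower ((PySem.Dict.mk c).getD "claim_text" ""))) :=
    pv_any_or claims _ _
  have hP1 : claims.any pvP1
      = claims.any fun c => PySem.Str.isIn "configure" (PySem.Str.lower ((PySem.Dict.mk c).getD "claim_text" "")) := rfl
  rw [hP0, hP1]
  have hn : (0 : Int) ≤ (claims.length : Int) := by positivity
  simp only [max_def, min_def]
  split_ifs <;> omega
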